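-- pv_equiv track=rewrite | github.com/Mister-0-Zero/cryptography | permutationСiphers/routeRearrangement.py | _build_route_positions
-- ===== SOURCE A (Python) =====
-- def _build_route_positions(rows: int, cols: int, mode: int) -> list[tuple[int, int]]:
--     route_positions: list[tuple[int, int]] = []
--
--     if mode == 1:
--         for i in range(rows):
--             if i % 2 == 0:
--                 for j in range(cols):
--                     route_positions.append((i, j))
--             else:
--                 for j in range(cols - 1, -1, -1):
--                     route_positions.append((i, j))
--
--     elif mode == 2:
--         for i in range(rows):
--             if i % 2 == 0:
--                 for j in range(cols - 1, -1, -1):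
--                     route_positions.append((i, j))
--             else:
--                 for j in range(cols):
--                     route_positions.append((i, j))
--
--     elif mode == 3:
--         top, bottom = 0, rows - 1
--         left, right = 0, cols - 1
--         while top <= bottom and left <= right:
--             for j in range(left, right + 1):
--                 route_positions.append((top, j))
--             top += 1
--             for i in range(top, bottom + 1):
--                 route_positions.append((i, right))
--             right -= 1
--             if top <= bottom:
--                 for j in range(right, left - 1, -1):
--                     route_positions.append((bottom, j))
--                 bottom -= 1
--             if left <= right:
--                 for i in range(bottom, top - 1, -1):
--                     route_positions.append((i, left))
--                 left += 1
--
--     elif mode == 4: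
--         top, bottom = 0, rows - 1
--         left, right = 0, cols - 1
--         while top <= bottom and left <= right:
--             for i in range(top, bottom + 1):
--                 route_positions.append((i, left))
--             left += 1
--             for j in range(left, right + 1):
--                 route_positions.append((bottom, j))
--             bottom -= 1
--             if left <= right:
--                 for i in range(bottom, top - 1, -1):
--                     route_positions.append((i, right))
--                 right -= 1
--             if top <= bottom:
--                 for j in range(right, left - 1, -1):
--                     route_positions.append((top, j))
--                 top += 1
--
--     elif mode == 5:
--         for j in range(cols):
--             for i in range(rows - 1, -1, -1):
--                 route_positions.append((i, j))
--
--     elif mode == 6: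
--         for j in range(cols):
--             for i in range(rows):
--                 route_positions.append((i, j))
--
--     else:
--         raise ValueError("Маршрут должен быть числом от 1 до 6.")
--
--     return route_positions
-- ===== SOURCE B (Python) =====
-- def _rotate_ccw(g):
--     # rotate a rectangular grid 90 degrees counter-clockwise
--     if not g:
--         return []
--     return [[row[k] for row in g] for k in range(len(g[0]))][::-1]
--
--
-- def _spiral_cw(rows, cols):
--     # clockwise spiral: peel the top row, rotate the rest CCW, repeat
--     grid = [[(i, j) for j in range(cols)] for i in range(rows)]
--     out = []
--     while grid and grid[0]:
--         out += grid[0]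
--         grid = _rotate_ccw(grid[1:])
--     return out
--
--
-- def _build_route_positions(rows: int, cols: int, mode: int) -> list[tuple[int, int]]:
--     if mode == 1:
--         return [p for i in range(rows)
--                 for p in ([(i, j) for j in range(cols)] if i % 2 == 0
--                           else [(i, j) for j in range(cols)][::-1])]
--     if mode == 2:
--         return [p for i in range(rows)
--                 for p in ([(i, j) for j in range(cols)][::-1] if i % 2 == 0
--                           else [(i, j) for j in range(cols)])]
--     if mode == 3:
--         return _spiral_cw(rows, cols)
--     if mode == 4:
--         return [(i, j) for (j, i) in _spiral_cw(cols, rows)]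
--     if mode == 5:
--         return [p for j in range(cols) for p in [(i, j) for i in range(rows)][::-1]]
--     if mode == 6:
--         return [p for j in range(cols) for p in [(i, j) for i in range(rows)]]
--     raise ValueError("Маршрут должен быть числом от 1 до 6.")
-- ===== Notes on version B (the rewrite author's own statement) =====
-- stated objective: alternative
-- what changed: The two spiral modes are rebuilt as a peel-the-top-row-then-rotate-the-grid-90°-CCW recursion (mode 4 obtained from the mode-3 spiral of the transposed grid by swapping coordinates) instead of a while loop shrinking four boundary counters, and the snake/column modes become flat comprehensions instead of nested append loops.
import Mathlib
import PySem

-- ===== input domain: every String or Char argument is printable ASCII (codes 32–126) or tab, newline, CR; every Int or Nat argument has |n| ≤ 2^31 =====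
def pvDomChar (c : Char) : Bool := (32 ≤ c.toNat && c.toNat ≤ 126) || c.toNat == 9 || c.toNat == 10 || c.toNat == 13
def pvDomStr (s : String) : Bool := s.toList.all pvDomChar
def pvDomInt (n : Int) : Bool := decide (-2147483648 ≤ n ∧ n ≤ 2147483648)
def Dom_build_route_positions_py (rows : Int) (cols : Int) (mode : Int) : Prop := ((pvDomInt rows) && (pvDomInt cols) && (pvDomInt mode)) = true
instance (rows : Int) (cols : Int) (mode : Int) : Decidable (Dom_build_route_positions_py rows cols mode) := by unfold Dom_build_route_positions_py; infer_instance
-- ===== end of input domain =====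

-- B replaces the boundary-shrinking spiral loops of modes 3/4 by a peel-top-row-then-rotate-grid
-- recursion (mode 4 as the transposed mode-3 spiral) and the snake/column modes by flat comprehensions
-- (objective: alternative; return value only — neither side mutates its arguments).


-- ===== PORT A =====
-- A's mode-3 while loop, accumulator threaded exactly like `route_positions`
def spiralLoop3 (top bottom left right : Int) (acc : List (Int × Int)) : List (Int × Int) :=
  if top ≤ bottom ∧ left ≤ right then
    let acc1 := (PySem.List.pyRange left (right + 1) 1).foldl (fun a j => a ++ [(top, j)]) acc
    let acc2 := (PySem.List.pyRange (top + 1) (bottom + 1) 1).foldl (fun a i => a ++ [(i, right)]) acc1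
    let acc3 := if top + 1 ≤ bottom then
        (PySem.List.pyRange (right - 1) (left - 1) (-1)).foldl (fun a j => a ++ [(bottom, j)]) acc2
      else acc2
    let bottom1 := if top + 1 ≤ bottom then bottom - 1 else bottom
    let acc4 := if left ≤ right - 1 then
        (PySem.List.pyRange bottom1 (top + 1 - 1) (-1)).foldl (fun a i => a ++ [(i, left)]) acc3
      else acc3
    let left1 := if left ≤ right - 1 then left + 1 else left
    spiralLoop3 (top + 1) bottom1 left1 (right - 1) acc4
  else acc
termination_by (bottom - top + 1).toNat
decreasing_by split <;> omega

-- A's mode-4 while loop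
def spiralLoop4 (top bottom left right : Int) (acc : List (Int × Int)) : List (Int × Int) :=
  if top ≤ bottom ∧ left ≤ right then
    let acc1 := (PySem.List.pyRange top (bottom + 1) 1).foldl (fun a i => a ++ [(i, left)]) acc
    let acc2 := (PySem.List.pyRange (left + 1) (right + 1) 1).foldl (fun a j => a ++ [(bottom, j)]) acc1
    let acc3 := if left + 1 ≤ right then
        (PySem.List.pyRange (bottom - 1) (top - 1) (-1)).foldl (fun a i => a ++ [(i, right)]) acc2
      else acc2
    let right1 := if left + 1 ≤ right then right - 1 else right
    let acc4 := if top ≤ bottom - 1 then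
        (PySem.List.pyRange right1 (left + 1 - 1) (-1)).foldl (fun a j => a ++ [(top, j)]) acc3
      else acc3
    let top1 := if top ≤ bottom - 1 then top + 1 else top
    spiralLoop4 top1 (bottom - 1) (left + 1) right1 acc4
  else acc
termination_by (bottom - top + 1).toNat
decreasing_by split <;> omega

def build_route_positions_py (rows : Int) (cols : Int) (mode : Int) : List (Int × Int) :=
  if mode = 1 then
    (PySem.List.pyRange 0 rows 1).foldl (fun acc i =>
      if PySem.Int.mod i 2 = 0 then
        (PySem.List.pyRange 0 cols 1).foldl (fun a j => a ++ [(i, j)]) acc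
      else
        (PySem.List.pyRange (cols - 1) (-1) (-1)).foldl (fun a j => a ++ [(i, j)]) acc) []
  else if mode = 2 then
    (PySem.List.pyRange 0 rows 1).foldl (fun acc i =>
      if PySem.Int.mod i 2 = 0 then
        (PySem.List.pyRange (cols - 1) (-1) (-1)).foldl (fun a j => a ++ [(i, j)]) acc
      else
        (PySem.List.pyRange 0 cols 1).foldl (fun a j => a ++ [(i, j)]) acc) []
  else if mode = 3 then
    spiralLoop3 0 (rows - 1) 0 (cols - 1) []
  else if mode = 4 then
    spiralLoop4 0 (rows - 1) 0 (cols - 1) []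
  else if mode = 5 then
    (PySem.List.pyRange 0 cols 1).foldl (fun acc j =>
      (PySem.List.pyRange (rows - 1) (-1) (-1)).foldl (fun a i => a ++ [(i, j)]) acc) []
  else if mode = 6 then
    (PySem.List.pyRange 0 cols 1).foldl (fun acc j =>
      (PySem.List.pyRange 0 rows 1).foldl (fun a i => a ++ [(i, j)]) acc) []
  else []  -- Python raises ValueError here; excluded by Pre_

-- ===== PORT B =====
-- rotate a rectangular coordinate grid 90° counter-clockwise (Source B `_rotate_ccw`)
def rotCCW (g : List (List (Int × Int))) : List (List (Int × Int)) :=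
  match g with
  | [] => []
  | g0 :: _ =>
    ((PySem.List.pyRange 0 (g0.length : Int) 1).map
      (fun k => g.map (fun row => PySem.List.pyGetD row k (0, 0)))).reverse

-- Source B's `while grid and grid[0]` loop; the fuel only totalizes the recursion (Python has no fuel)
def spiralGo : Nat → List (List (Int × Int)) → List (Int × Int)
  | 0, _ => []
  | _ + 1, [] => []
  | fuel + 1, g0 :: gt => if g0 = [] then [] else g0 ++ spiralGo fuel (rotCCW gt)

-- Source B `_spiral_cw`: peel the top row, rotate the rest CCW, repeat; 4*rows+4 steps always suffice
def spiralCW (rows cols : Int) : List (Int × Int) :=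
  spiralGo (4 * rows + 4).toNat
    ((PySem.List.pyRange 0 rows 1).map (fun i =>
      (PySem.List.pyRange 0 cols 1).map (fun j => ((i : Int), (j : Int)))))

def build_route_positions_py_alt (rows : Int) (cols : Int) (mode : Int) : List (Int × Int) :=
  if mode = 1 then
    (PySem.List.pyRange 0 rows 1).flatMap (fun i =>
      if PySem.Int.mod i 2 = 0 then (PySem.List.pyRange 0 cols 1).map (fun j => (i, j))
      else ((PySem.List.pyRange 0 cols 1).map (fun j => (i, j))).reverse)
  else if mode = 2 then
    (PySem.List.pyRange 0 rows 1).flatMap (fun i =>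
      if PySem.Int.mod i 2 = 0 then ((PySem.List.pyRange 0 cols 1).map (fun j => (i, j))).reverse
      else (PySem.List.pyRange 0 cols 1).map (fun j => (i, j)))
  else if mode = 3 then
    spiralCW rows cols
  else if mode = 4 then
    (spiralCW cols rows).map (fun p => (p.2, p.1))
  else if mode = 5 then
    (PySem.List.pyRange 0 cols 1).flatMap (fun j =>
      ((PySem.List.pyRange 0 rows 1).map (fun i => (i, j))).reverse)
  else if mode = 6 then
    (PySem.List.pyRange 0 cols 1).flatMap (fun j =>
      (PySem.List.pyRange 0 rows 1).map (fun i => (i, j)))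
  else []  -- Python raises ValueError here; excluded by Pre_

-- ===== PRECONDITION & SPEC =====
-- Pre_ excludes exactly the modes outside 1..6, on which A raises ValueError.
def Pre_build_route_positions_py (rows : Int) (cols : Int) (mode : Int) : Prop :=
  1 ≤ mode ∧ mode ≤ 6
instance (rows : Int) (cols : Int) (mode : Int) : Decidable (Pre_build_route_positions_py rows cols mode) := by
  unfold Pre_build_route_positions_py; infer_instance

def pvWitness_build_route_positions_py : Int × Int × Int := (4, 3, 3)

def Spec_build_route_positions_py (rows : Int) (cols : Int) (mode : Int) (out : List (Int × Int)) : Prop := out = build_route_positions_py_alt rows cols mode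
instance (rows : Int) (cols : Int) (mode : Int) (out : List (Int × Int)) : Decidable (Spec_build_route_positions_py rows cols mode out) := by unfold Spec_build_route_positions_py; infer_instance

-- ===== CLAIM (what is proved, stated in full; the proofs are below) =====
def Claim_equal_build_route_positions_py : Prop := ∀ (rows : Int) (cols : Int) (mode : Int), Dom_build_route_positions_py rows cols mode → Pre_build_route_positions_py rows cols mode → Spec_build_route_positions_py rows cols mode (build_route_positions_py rows cols mode)

-- ===== LEMMAS AND PROOFS =====

theorem spiralGo_nil (f : Nat) : spiralGo f [] = [] := by cases f <;> rfl

theorem spiralGo_nil_head (f : Nat) (gt : List (List (Int × Int))) : spiralGo f ([] :: gt) = [] := by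
  cases f <;> simp [spiralGo]

theorem rotCCW_grid (I J : List Int) (h : Int → Int → Int × Int) (hI : I ≠ []) :
    rotCCW (I.map fun i => J.map fun j => h i j) = (J.map fun j => I.map fun i => h i j).reverse := by
  obtain ⟨i0, I', rfl⟩ := List.exists_cons_of_ne_nil hI
  simp only [List.map_cons, rotCCW]
  congr 1
  apply List.ext_getElem
  · simp [PySem.List.length_pyRange_one]
  · intro k hk1 hk2
    have hkJ : k < J.length := by
      simpa [PySem.List.length_pyRange_one] using hk1
    have hget : ∀ i : Int, PySem.List.pyGetD (J.map fun j => h i j) ((0 : Int) + (k : Int)) ((0 : Int), (0 : Int)) = h i J[k] := by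
      intro i
      rw [zero_add, PySem.List.pyGetD_natCast]
      rw [List.getD_eq_getElem _ _ (by simpa using hkJ)]
      simp
    simp only [List.getElem_map, PySem.List.getElem_pyRange_one, hget]
    simp [List.map_map]
    intro a _
    rw [List.getElem?_eq_getElem hkJ]
    rfl

theorem spiralGo_succ (f : Nat) (g0 : List (Int × Int)) (gt : List (List (Int × Int)))
    (h : g0 ≠ []) : spiralGo (f + 1) (g0 :: gt) = g0 ++ spiralGo f (rotCCW gt) := by
  simp [spiralGo, h]

theorem spiral_step (n : Nat)
    (ih : ∀ (t b l r : Int) (fuel : Nat) (acc : List (Int × Int)),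
      t ≤ b → l ≤ r → (b - t).toNat ≤ n → 4 * n + 4 ≤ fuel →
      spiralLoop3 t b l r acc =
        acc ++ spiralGo fuel ((PySem.List.pyRange t (b + 1) 1).map (fun i =>
          (PySem.List.pyRange l (r + 1) 1).map (fun j => ((i : Int), (j : Int))))))
    (t b l r : Int) (fuel : Nat) (acc : List (Int × Int))
    (ht : t ≤ b) (hl : l ≤ r) (hn : (b - t).toNat ≤ n + 1) (hf : 4 * (n + 1) + 4 ≤ fuel) :
    spiralLoop3 t b l r acc =
      acc ++ spiralGo fuel ((PySem.List.pyRange t (b + 1) 1).map (fun i =>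
        (PySem.List.pyRange l (r + 1) 1).map (fun j => ((i : Int), (j : Int))))) := by
  obtain ⟨f, rfl⟩ : ∃ f, fuel = f + 4 := ⟨fuel - 4, by omega⟩
  have hg : t ≤ b ∧ l ≤ r := ⟨ht, hl⟩
  rw [spiralLoop3]
  simp only [if_pos hg, PySem.List.foldl_append_singleton_eq_map]
  -- peel the top row on the B side
  have hpeel1 : (PySem.List.pyRange t (b + 1) 1).map (fun i =>
      (PySem.List.pyRange l (r + 1) 1).map (fun j => ((i : Int), j))) =
      ((PySem.List.pyRange l (r + 1) 1).map (fun j => ((t : Int), j))) ::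
      ((PySem.List.pyRange (t + 1) (b + 1) 1).map (fun i =>
        (PySem.List.pyRange l (r + 1) 1).map (fun j => ((i : Int), j)))) := by
    rw [PySem.List.pyRange_one_cons (show t < b + 1 by omega), List.map_cons]
  rw [hpeel1]
  have hrow : ((PySem.List.pyRange l (r + 1) 1).map (fun j => ((t : Int), j))) ≠ [] := by
    simp [PySem.List.pyRange_one_cons (show l < r + 1 by omega)]
  rw [show f + 4 = (f + 3) + 1 from rfl, spiralGo_succ _ _ _ hrow]
  by_cases htb : t + 1 ≤ b
  case neg =>
    -- single row: the rest of the grid is empty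
    have h2 : PySem.List.pyRange (t + 1) (b + 1) 1 = [] :=
      PySem.List.pyRange_one_eq_nil (by omega)
    rw [h2]
    simp only [List.map_nil]
    rw [show rotCCW [] = [] from rfl, spiralGo_nil]
    rw [spiralLoop3]
    have hng : ¬(t + 1 ≤ (if t + 1 ≤ b then b - 1 else b) ∧
        (if l ≤ r - 1 then l + 1 else l) ≤ r - 1) := by
      split_ifs <;> omega
    rw [if_neg hng]
    simp only [if_neg htb]
    have h4 : PySem.List.pyRange b (t + 1 - 1) (-1) = [] :=
      PySem.List.pyRange_neg_one_eq_nil (by omega)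
    rw [h4]
    split_ifs <;> simp
  case pos =>
  have hI1 : PySem.List.pyRange (t + 1) (b + 1) 1 ≠ [] := by
    simp [PySem.List.pyRange_one_cons (show t + 1 < b + 1 by omega)]
  rw [rotCCW_grid _ _ (fun i j => ((i : Int), j)) hI1]
  -- expose the right column as the head
  have hpeel2 : ((PySem.List.pyRange l (r + 1) 1).map (fun j =>
      (PySem.List.pyRange (t + 1) (b + 1) 1).map (fun i => ((i : Int), j)))).reverse =
      ((PySem.List.pyRange (t + 1) (b + 1) 1).map (fun i => ((i : Int), (r : Int)))) ::
      ((PySem.List.pyRange l r 1).map (fun j =>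
        (PySem.List.pyRange (t + 1) (b + 1) 1).map (fun i => ((i : Int), j)))).reverse := by
    conv_lhs => rw [PySem.List.pyRange_one_succ_right (show l ≤ r from hl)]
    simp
  rw [hpeel2]
  have hcol : ((PySem.List.pyRange (t + 1) (b + 1) 1).map (fun i => (i, (r : Int)))) ≠ [] := by
    simp [PySem.List.pyRange_one_cons (show t + 1 < b + 1 by omega)]
  rw [show f + 3 = (f + 2) + 1 from rfl, spiralGo_succ _ _ _ hcol]
  simp only [if_pos htb]
  by_cases hlr : l + 1 ≤ r
  case neg =>
    -- single column: l = r
    have h2 : PySem.List.pyRange l r 1 = [] := PySem.List.pyRange_one_eq_nil (by omega)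
    rw [h2]
    simp only [List.map_nil, List.reverse_nil]
    rw [show rotCCW [] = [] from rfl, spiralGo_nil]
    have h3 : PySem.List.pyRange (r - 1) (l - 1) (-1) = [] :=
      PySem.List.pyRange_neg_one_eq_nil (by omega)
    have hng4 : ¬(l ≤ r - 1) := by omega
    rw [h3]
    simp only [if_neg hng4]
    rw [spiralLoop3]
    have hng : ¬(t + 1 ≤ b - 1 ∧ l ≤ r - 1) := by omega
    rw [if_neg hng]
    simp
  case pos =>
  rw [← List.map_reverse]
  have hI2 : (PySem.List.pyRange l r 1).reverse ≠ [] := by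
    simp [PySem.List.pyRange_one_cons (show l < r by omega)]
  rw [rotCCW_grid _ _ (fun j i => ((i : Int), (j : Int))) hI2]
  -- expose the reversed bottom row as the head
  have hpeel3 : ((PySem.List.pyRange (t + 1) (b + 1) 1).map (fun i =>
      ((PySem.List.pyRange l r 1).reverse).map (fun j => ((i : Int), j)))).reverse =
      (((PySem.List.pyRange l r 1).reverse).map (fun j => ((b : Int), j))) ::
      ((PySem.List.pyRange (t + 1) b 1).map (fun i =>
        ((PySem.List.pyRange l r 1).reverse).map (fun j => ((i : Int), j)))).reverse := by
    conv_lhs => rw [PySem.List.pyRange_one_succ_right (show t + 1 ≤ b from htb)]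
    simp
  rw [hpeel3]
  have hbrow : (((PySem.List.pyRange l r 1).reverse).map (fun j => ((b : Int), j))) ≠ [] := by
    simp [PySem.List.pyRange_one_cons (show l < r by omega)]
  rw [show f + 2 = (f + 1) + 1 from rfl, spiralGo_succ _ _ _ hbrow]
  have hlr' : l ≤ r - 1 := by omega
  simp only [if_pos hlr']
  by_cases htb2 : t + 1 ≤ b - 1
  case neg =>
    -- exactly two rows: t + 1 = b
    have h2 : PySem.List.pyRange (t + 1) b 1 = [] := PySem.List.pyRange_one_eq_nil (by omega)
    rw [h2]
    simp only [List.map_nil, List.reverse_nil]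
    rw [show rotCCW [] = [] from rfl, spiralGo_nil]
    have h4 : PySem.List.pyRange (b - 1) (t + 1 - 1) (-1) = [] :=
      PySem.List.pyRange_neg_one_eq_nil (by omega)
    rw [h4, spiralLoop3]
    have hng : ¬(t + 1 ≤ b - 1 ∧ l + 1 ≤ r - 1) := by omega
    rw [if_neg hng]
    rw [PySem.List.pyRange_neg_one_eq_reverse]
    simp [show l - 1 + 1 = l by ring, show r - 1 + 1 = r by ring, List.append_assoc]
  case pos =>
  rw [← List.map_reverse]
  have hI3 : (PySem.List.pyRange (t + 1) b 1).reverse ≠ [] := by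
    simp [PySem.List.pyRange_one_cons (show t + 1 < b by omega)]
  rw [rotCCW_grid _ _ (fun i j => ((i : Int), (j : Int))) hI3]
  -- un-reverse: the grid is now column-major, columns l..r-1 left to right
  have hunrev3 : ((PySem.List.pyRange l r 1).reverse.map (fun j =>
      ((PySem.List.pyRange (t + 1) b 1).reverse).map (fun i => ((i : Int), j)))).reverse =
      (PySem.List.pyRange l r 1).map (fun j =>
      ((PySem.List.pyRange (t + 1) b 1).reverse).map (fun i => ((i : Int), j))) := by
    rw [List.map_reverse, List.reverse_reverse]
  rw [hunrev3]
  have hpeel4 : (PySem.List.pyRange l r 1).map (fun j =>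
      ((PySem.List.pyRange (t + 1) b 1).reverse).map (fun i => ((i : Int), j))) =
      (((PySem.List.pyRange (t + 1) b 1).reverse).map (fun i => ((i : Int), (l : Int)))) ::
      ((PySem.List.pyRange (l + 1) r 1).map (fun j =>
        ((PySem.List.pyRange (t + 1) b 1).reverse).map (fun i => ((i : Int), j)))) := by
    rw [PySem.List.pyRange_one_cons (show l < r by omega), List.map_cons]
  rw [hpeel4]
  have hlcol : (((PySem.List.pyRange (t + 1) b 1).reverse).map (fun i => (i, (l : Int)))) ≠ [] := by
    simp [PySem.List.pyRange_one_cons (show t + 1 < b by omega)]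
  rw [spiralGo_succ _ _ _ hlcol]
  by_cases hlr2 : l + 1 ≤ r - 1
  case neg =>
    -- exactly two columns: l + 1 = r
    have h2 : PySem.List.pyRange (l + 1) r 1 = [] := PySem.List.pyRange_one_eq_nil (by omega)
    rw [h2]
    simp only [List.map_nil]
    rw [show rotCCW [] = [] from rfl, spiralGo_nil]
    rw [spiralLoop3]
    have hng : ¬(t + 1 ≤ b - 1 ∧ l + 1 ≤ r - 1) := by omega
    rw [if_neg hng]
    rw [PySem.List.pyRange_neg_one_eq_reverse, PySem.List.pyRange_neg_one_eq_reverse]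
    simp [show l - 1 + 1 = l by ring, show r - 1 + 1 = r by ring,
      show b - 1 + 1 = b by ring, List.append_assoc]
  case pos =>
  have hI4 : PySem.List.pyRange (l + 1) r 1 ≠ [] := by
    simp [PySem.List.pyRange_one_cons (show l + 1 < r by omega)]
  rw [rotCCW_grid _ _ (fun j i => ((i : Int), (j : Int))) hI4]
  have hunrev4 : (((PySem.List.pyRange (t + 1) b 1).reverse).map (fun i =>
      (PySem.List.pyRange (l + 1) r 1).map (fun j => ((i : Int), j)))).reverse =
      (PySem.List.pyRange (t + 1) b 1).map (fun i =>
      (PySem.List.pyRange (l + 1) r 1).map (fun j => ((i : Int), j))) := by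
    rw [List.map_reverse, List.reverse_reverse]
  rw [hunrev4]
  -- the remaining grid is the inner grid; apply the induction hypothesis
  have hinner : (PySem.List.pyRange (t + 1) b 1).map (fun i =>
      (PySem.List.pyRange (l + 1) r 1).map (fun j => ((i : Int), j))) =
      (PySem.List.pyRange (t + 1) ((b - 1) + 1) 1).map (fun i =>
      (PySem.List.pyRange (l + 1) ((r - 1) + 1) 1).map (fun j => ((i : Int), j))) := by
    norm_num
  rw [hinner]
  rw [ih (t + 1) (b - 1) (l + 1) (r - 1) f _ (by omega) (by omega) (by omega) (by omega)]
  rw [PySem.List.pyRange_neg_one_eq_reverse, PySem.List.pyRange_neg_one_eq_reverse]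
  simp [show l - 1 + 1 = l by ring, show r - 1 + 1 = r by ring, show b - 1 + 1 = b by ring,
    List.append_assoc]

theorem spiral_base (t l r : Int) (fuel : Nat) (acc : List (Int × Int))
    (hl : l ≤ r) (hf : 1 ≤ fuel) :
    spiralLoop3 t t l r acc =
      acc ++ spiralGo fuel ((PySem.List.pyRange t (t + 1) 1).map (fun i =>
        (PySem.List.pyRange l (r + 1) 1).map (fun j => ((i : Int), (j : Int))))) := by
  obtain ⟨f, rfl⟩ : ∃ f, fuel = f + 1 := ⟨fuel - 1, by omega⟩
  have hg : t ≤ t ∧ l ≤ r := ⟨le_refl t, hl⟩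
  rw [spiralLoop3]
  simp only [if_pos hg, PySem.List.foldl_append_singleton_eq_map]
  have hpeel : (PySem.List.pyRange t (t + 1) 1).map (fun i =>
      (PySem.List.pyRange l (r + 1) 1).map (fun j => ((i : Int), j))) =
      [((PySem.List.pyRange l (r + 1) 1).map (fun j => ((t : Int), j)))] := by
    rw [PySem.List.pyRange_one_singleton, List.map_cons, List.map_nil]
  rw [hpeel]
  have hrow : ((PySem.List.pyRange l (r + 1) 1).map (fun j => ((t : Int), j))) ≠ [] := by
    simp [PySem.List.pyRange_one_cons (show l < r + 1 by omega)]
  rw [spiralGo_succ _ _ _ hrow]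
  rw [show rotCCW [] = [] from rfl, spiralGo_nil]
  have h2 : PySem.List.pyRange (t + 1) (t + 1) 1 = [] :=
    PySem.List.pyRange_one_eq_nil (by omega)
  rw [h2]
  rw [spiralLoop3]
  have hng : ¬(t + 1 ≤ (if t + 1 ≤ t then t - 1 else t) ∧
      (if l ≤ r - 1 then l + 1 else l) ≤ r - 1) := by
    split_ifs <;> omega
  rw [if_neg hng]
  have hntb : ¬(t + 1 ≤ t) := by omega
  simp only [if_neg hntb]
  have h4 : PySem.List.pyRange t (t + 1 - 1) (-1) = [] :=
    PySem.List.pyRange_neg_one_eq_nil (by omega)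
  rw [h4]
  split_ifs <;> simp

theorem spiral_main : ∀ (n : Nat) (t b l r : Int) (fuel : Nat) (acc : List (Int × Int)),
    t ≤ b → l ≤ r → (b - t).toNat ≤ n → 4 * n + 4 ≤ fuel →
    spiralLoop3 t b l r acc =
      acc ++ spiralGo fuel ((PySem.List.pyRange t (b + 1) 1).map (fun i =>
        (PySem.List.pyRange l (r + 1) 1).map (fun j => ((i : Int), (j : Int))))) := by
  intro n
  induction n with
  | zero =>
    intro t b l r fuel acc ht hl hn hf
    have hbt : b = t := by omega
    subst hbt
    exact spiral_base b l r fuel acc hl (by omega)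
  | succ n ih =>
    intro t b l r fuel acc ht hl hn hf
    exact spiral_step n ih t b l r fuel acc ht hl hn hf

theorem spiralLoop3_acc : ∀ (n : Nat) (t b l r : Int) (acc : List (Int × Int)),
    (b - t + 1).toNat ≤ n →
    spiralLoop3 t b l r acc = acc ++ spiralLoop3 t b l r [] := by
  intro n
  induction n with
  | zero =>
    intro t b l r acc hn
    rw [spiralLoop3]
    conv_rhs => rw [spiralLoop3]
    have hng : ¬(t ≤ b ∧ l ≤ r) := by omega
    simp [hng]
  | succ n ih =>
    intro t b l r acc hn
    by_cases hg : t ≤ b ∧ l ≤ r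
    · rw [spiralLoop3]
      conv_rhs => rw [spiralLoop3]
      simp only [if_pos hg, PySem.List.foldl_append_singleton_eq_map]
      split_ifs with h1 h2 <;>
        (rw [ih _ _ _ _ _ (by omega)]
         conv_rhs => rw [ih _ _ _ _ _ (by omega)]) <;>
        simp [List.append_assoc]
    · rw [spiralLoop3]
      conv_rhs => rw [spiralLoop3]
      simp [hg]

theorem spiralLoop3_append (t b l r : Int) (acc : List (Int × Int)) :
    spiralLoop3 t b l r acc = acc ++ spiralLoop3 t b l r [] :=
  spiralLoop3_acc _ t b l r acc le_rfl

theorem swap43 : ∀ (n : Nat) (t b l r : Int) (acc : List (Int × Int)),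
    (b - t + 1).toNat ≤ n →
    spiralLoop4 t b l r acc = acc ++ (spiralLoop3 l r t b []).map (fun p => (p.2, p.1)) := by
  intro n
  induction n with
  | zero =>
    intro t b l r acc hn
    rw [spiralLoop4]
    conv_rhs => rw [spiralLoop3]
    have h4 : ¬(t ≤ b ∧ l ≤ r) := by omega
    have h3 : ¬(l ≤ r ∧ t ≤ b) := by omega
    simp [h4, h3]
  | succ n ih =>
    intro t b l r acc hn
    by_cases hg : t ≤ b ∧ l ≤ r
    · have hg' : l ≤ r ∧ t ≤ b := ⟨hg.2, hg.1⟩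
      rw [spiralLoop4]
      conv_rhs => rw [spiralLoop3]
      simp only [if_pos hg, if_pos hg', PySem.List.foldl_append_singleton_eq_map]
      split_ifs with h1 h2 <;>
        (rw [ih _ _ _ _ _ (by omega)]
         conv_rhs => rw [spiralLoop3_append]) <;>
        simp [List.append_assoc, List.map_map, Function.comp_def]
    · have hg' : ¬(l ≤ r ∧ t ≤ b) := by omega
      rw [spiralLoop4]
      conv_rhs => rw [spiralLoop3]
      simp [hg, hg']

theorem spiralCW_eq (rows cols : Int) :
    spiralCW rows cols = spiralLoop3 0 (rows - 1) 0 (cols - 1) [] := by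
  by_cases hr : 1 ≤ rows
  · by_cases hc : 1 ≤ cols
    · rw [spiralCW]
      have hgrid : (PySem.List.pyRange 0 rows 1).map (fun i =>
          (PySem.List.pyRange 0 cols 1).map (fun j => ((i : Int), (j : Int)))) =
          (PySem.List.pyRange 0 ((rows - 1) + 1) 1).map (fun i =>
          (PySem.List.pyRange 0 ((cols - 1) + 1) 1).map (fun j => ((i : Int), (j : Int)))) := by
        norm_num
      rw [hgrid]
      have := (spiral_main (rows - 1).toNat 0 (rows - 1) 0 (cols - 1) ((4 * rows + 4).toNat) []
        (by omega) (by omega) (by omega) (by omega)).symm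
      simpa using this
    · have hnil : PySem.List.pyRange 0 cols 1 = [] := PySem.List.pyRange_one_eq_nil (by omega)
      rw [spiralCW, hnil]
      rw [PySem.List.pyRange_one_cons (show (0 : Int) < rows by omega), List.map_cons]
      simp only [List.map_nil]
      rw [spiralGo_nil_head]
      rw [spiralLoop3]
      have hng : ¬((0 : Int) ≤ rows - 1 ∧ (0 : Int) ≤ cols - 1) := by omega
      rw [if_neg hng]
  · have hnil : PySem.List.pyRange 0 rows 1 = [] := PySem.List.pyRange_one_eq_nil (by omega)
    rw [spiralCW, hnil]
    simp only [List.map_nil]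
    rw [spiralGo_nil]
    rw [spiralLoop3]
    have hng : ¬((0 : Int) ≤ rows - 1 ∧ (0 : Int) ≤ cols - 1) := by omega
    rw [if_neg hng]

theorem pyRange_desc_eq_reverse (cols : Int) :
    PySem.List.pyRange (cols - 1) (-1) (-1) = (PySem.List.pyRange 0 cols 1).reverse := by
  rw [PySem.List.pyRange_neg_one_eq_reverse]
  norm_num

theorem snake_eq (rows cols : Int) (p : Int → Prop) [DecidablePred p] :
    (PySem.List.pyRange 0 rows 1).foldl (fun acc i =>
      if p i then
        (PySem.List.pyRange 0 cols 1).foldl (fun a j => a ++ [(i, j)]) acc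
      else
        (PySem.List.pyRange (cols - 1) (-1) (-1)).foldl (fun a j => a ++ [(i, j)]) acc) [] =
    (PySem.List.pyRange 0 rows 1).flatMap (fun i =>
      if p i then (PySem.List.pyRange 0 cols 1).map (fun j => (i, j))
      else ((PySem.List.pyRange 0 cols 1).map (fun j => (i, j))).reverse) := by
  have hbody : (fun (acc : List (Int × Int)) (i : Int) =>
      if p i then
        (PySem.List.pyRange 0 cols 1).foldl (fun a j => a ++ [(i, j)]) acc
      else
        (PySem.List.pyRange (cols - 1) (-1) (-1)).foldl (fun a j => a ++ [(i, j)]) acc) =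
      (fun acc i => acc ++
        (if p i then (PySem.List.pyRange 0 cols 1).map (fun j => (i, j))
         else ((PySem.List.pyRange 0 cols 1).map (fun j => (i, j))).reverse)) := by
    funext acc i
    split_ifs
    · rw [PySem.List.foldl_append_singleton_eq_map]
    · rw [pyRange_desc_eq_reverse, PySem.List.foldl_append_singleton_eq_map, List.map_reverse]
  rw [hbody, PySem.List.foldl_append_eq_flatMap, List.nil_append]

theorem snake_eq' (rows cols : Int) (p : Int → Prop) [DecidablePred p] :
    (PySem.List.pyRange 0 rows 1).foldl (fun acc i =>
      if p i then
        (PySem.List.pyRange (cols - 1) (-1) (-1)).foldl (fun a j => a ++ [(i, j)]) acc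
      else
        (PySem.List.pyRange 0 cols 1).foldl (fun a j => a ++ [(i, j)]) acc) [] =
    (PySem.List.pyRange 0 rows 1).flatMap (fun i =>
      if p i then ((PySem.List.pyRange 0 cols 1).map (fun j => (i, j))).reverse
      else (PySem.List.pyRange 0 cols 1).map (fun j => (i, j))) := by
  have hbody : (fun (acc : List (Int × Int)) (i : Int) =>
      if p i then
        (PySem.List.pyRange (cols - 1) (-1) (-1)).foldl (fun a j => a ++ [(i, j)]) acc
      else
        (PySem.List.pyRange 0 cols 1).foldl (fun a j => a ++ [(i, j)]) acc) =
      (fun acc i => acc ++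
        (if p i then ((PySem.List.pyRange 0 cols 1).map (fun j => (i, j))).reverse
         else (PySem.List.pyRange 0 cols 1).map (fun j => (i, j)))) := by
    funext acc i
    split_ifs
    · rw [pyRange_desc_eq_reverse, PySem.List.foldl_append_singleton_eq_map, List.map_reverse]
    · rw [PySem.List.foldl_append_singleton_eq_map]
  rw [hbody, PySem.List.foldl_append_eq_flatMap, List.nil_append]

theorem col_rev_eq (rows cols : Int) :
    (PySem.List.pyRange 0 cols 1).foldl (fun acc j =>
      (PySem.List.pyRange (rows - 1) (-1) (-1)).foldl (fun a i => a ++ [(i, j)]) acc) [] =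
    (PySem.List.pyRange 0 cols 1).flatMap (fun j =>
      ((PySem.List.pyRange 0 rows 1).map (fun i => (i, j))).reverse) := by
  have hbody : (fun (acc : List (Int × Int)) (j : Int) =>
      (PySem.List.pyRange (rows - 1) (-1) (-1)).foldl (fun a i => a ++ [(i, j)]) acc) =
      (fun acc j => acc ++ ((PySem.List.pyRange 0 rows 1).map (fun i => (i, j))).reverse) := by
    funext acc j
    rw [pyRange_desc_eq_reverse, PySem.List.foldl_append_singleton_eq_map, List.map_reverse]
  rw [hbody, PySem.List.foldl_append_eq_flatMap, List.nil_append]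

theorem col_fwd_eq (rows cols : Int) :
    (PySem.List.pyRange 0 cols 1).foldl (fun acc j =>
      (PySem.List.pyRange 0 rows 1).foldl (fun a i => a ++ [(i, j)]) acc) [] =
    (PySem.List.pyRange 0 cols 1).flatMap (fun j =>
      (PySem.List.pyRange 0 rows 1).map (fun i => (i, j))) := by
  have hbody : (fun (acc : List (Int × Int)) (j : Int) =>
      (PySem.List.pyRange 0 rows 1).foldl (fun a i => a ++ [(i, j)]) acc) =
      (fun acc j => acc ++ (PySem.List.pyRange 0 rows 1).map (fun i => (i, j))) := by
    funext acc j
    rw [PySem.List.foldl_append_singleton_eq_map]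
  rw [hbody, PySem.List.foldl_append_eq_flatMap, List.nil_append]

-- ===== VERDICT (by name: the statement is the Claim_ definition above) =====
theorem build_route_positions_py_spec : Claim_equal_build_route_positions_py := by
  intro rows cols mode _hdom hpre
  unfold Spec_build_route_positions_py build_route_positions_py build_route_positions_py_alt
  have hm : mode = 1 ∨ mode = 2 ∨ mode = 3 ∨ mode = 4 ∨ mode = 5 ∨ mode = 6 := by
    obtain ⟨h1, h2⟩ := hpre
    omega
  rcases hm with rfl | rfl | rfl | rfl | rfl | rfl
  all_goals simp only [show ((2:Int) = 1) = False from by simp,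
    show ((3:Int) = 1) = False from by simp,
    show ((3:Int) = 2) = False from by simp, show ((3:Int) = 3) = True from by simp,
    show ((4:Int) = 1) = False from by simp, show ((4:Int) = 2) = False from by simp,
    show ((4:Int) = 3) = False from by simp, show ((4:Int) = 4) = True from by simp,
    show ((5:Int) = 1) = False from by simp, show ((5:Int) = 2) = False from by simp,
    show ((5:Int) = 3) = False from by simp, show ((5:Int) = 4) = False from by simp,
    show ((5:Int) = 5) = True from by simp, show ((6:Int) = 1) = False from by simp,
    show ((6:Int) = 2) = False from by simp, show ((6:Int) = 3) = False from by simp,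
    show ((6:Int) = 4) = False from by simp, show ((6:Int) = 5) = False from by simp,
    show ((6:Int) = 6) = True from by simp, ite_true, ite_false]
  · exact snake_eq rows cols (fun i => PySem.Int.mod i 2 = 0)
  · exact snake_eq' rows cols (fun i => PySem.Int.mod i 2 = 0)
  · exact (spiralCW_eq rows cols).symm
  · rw [spiralCW_eq cols rows]
    rw [swap43 (rows - 0 + 1).toNat 0 (rows - 1) 0 (cols - 1) [] (by omega)]
    simp
  · exact col_rev_eq rows cols
  · exact col_fwd_eq rows cols
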